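-- pv_equiv track=rewrite | github.com/quandangv/layerimg | main.py | range2d
-- ===== SOURCE A (Python) =====
-- def range2d(a, b=None):
--   if b:
--     for x in range(a[0], b[0]):
--       for y in range(a[1], b[1]):
--         yield (x, y)
--   else:
--     for x in range(a[0]):
--       for y in range(a[1]):
--         yield (x, y)
-- ===== SOURCE B (Python) =====
-- def range2d(a, b=None):
--   if b:
--     bx, by = a[0], a[1]
--     w, h = b[0] - a[0], b[1] - a[1]
--   else:
--     bx = by = 0
--     w, h = a[0], a[1]
--   n = w * h if (w > 0 and h > 0) else 0
--   return ((bx + i // h, by + i % h) for i in range(n))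
-- ===== Notes on version B (the rewrite author's own statement) =====
-- stated objective: alternative
-- what changed: Replaces the nested double loop with a single flat loop over range(w*h), decoding each index into coordinates with // and % (row-major, y-fastest), after computing base and extent once per branch.
import Mathlib
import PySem

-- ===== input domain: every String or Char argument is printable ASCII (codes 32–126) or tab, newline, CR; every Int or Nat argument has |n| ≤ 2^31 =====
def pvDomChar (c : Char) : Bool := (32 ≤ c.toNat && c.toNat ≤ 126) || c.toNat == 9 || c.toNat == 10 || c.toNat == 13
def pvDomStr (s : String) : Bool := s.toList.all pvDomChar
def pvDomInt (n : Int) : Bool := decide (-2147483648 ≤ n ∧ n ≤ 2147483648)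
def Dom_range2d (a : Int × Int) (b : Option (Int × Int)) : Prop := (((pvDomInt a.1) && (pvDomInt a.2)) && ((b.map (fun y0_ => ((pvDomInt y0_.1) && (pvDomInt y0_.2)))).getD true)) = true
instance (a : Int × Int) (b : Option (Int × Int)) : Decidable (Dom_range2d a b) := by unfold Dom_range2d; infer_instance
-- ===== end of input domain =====

-- B replaces A's nested double loop by one flat loop over range(w*h) decoding each
-- index with // and % (same values, same row-major order; objective: alternative).

-- ===== PORT A =====
-- nested 'for x … for y … yield (x,y)' = flatMap of map over the two ranges
def range2d (a : Int × Int) (b : Option (Int × Int)) : List (Int × Int) :=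
  match b with
  | some bb =>
    (PySem.List.pyRange a.1 bb.1 1).flatMap (fun x =>
      (PySem.List.pyRange a.2 bb.2 1).map (fun y => (x, y)))
  | none =>
    (PySem.List.pyRange 0 a.1 1).flatMap (fun x =>
      (PySem.List.pyRange 0 a.2 1).map (fun y => (x, y)))

-- ===== PORT B =====
def range2d_alt (a : Int × Int) (b : Option (Int × Int)) : List (Int × Int) :=
  let p : Int × Int × Int × Int :=
    match b with
    | some bb => (a.1, a.2, bb.1 - a.1, bb.2 - a.2)
    | none => (0, 0, a.1, a.2)
  let bx := p.1; let by_ := p.2.1; let w := p.2.2.1; let h := p.2.2.2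
  let n : Int := if 0 < w ∧ 0 < h then w * h else 0
  (PySem.List.pyRange 0 n 1).map
    (fun i => (bx + PySem.Int.floordiv i h, by_ + PySem.Int.mod i h))

-- ===== PRECONDITION & SPEC =====
def Spec_range2d (a : Int × Int) (b : Option (Int × Int)) (out : List (Int × Int)) : Prop := out = range2d_alt a b
instance (a : Int × Int) (b : Option (Int × Int)) (out : List (Int × Int)) : Decidable (Spec_range2d a b out) := by unfold Spec_range2d; infer_instance

-- ===== CLAIM (what is proved, stated in full; the proofs are below) =====
def Claim_equal_range2d : Prop := ∀ (a : Int × Int) (b : Option (Int × Int)), Dom_range2d a b → Spec_range2d a b (range2d a b)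

-- ===== LEMMAS AND PROOFS =====

/-- Flattening a nested range iteration equals a single range with div/mod decoding. -/
theorem pv_flatdecode {α : Type} (f : Nat → Nat → α) (n m : Nat) :
    (List.range n).flatMap (fun k => (List.range m).map (fun j => f k j)) =
    (List.range (n * m)).map (fun i => f (i / m) (i % m)) := by
  induction n with
  | zero => simp
  | succ n ih =>
    rw [List.range_succ, List.flatMap_append, ih, Nat.succ_mul, List.range_add,
      List.map_append, List.map_map]
    congr 1
    simp only [List.flatMap_cons, List.flatMap_nil, List.append_nil, Function.comp_def]
    apply List.map_congr_left
    intro j hj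
    rw [List.mem_range] at hj
    have hm : 0 < m := by omega
    have h1 : (n * m + j) / m = n := by
      rw [Nat.add_comm, Nat.add_mul_div_right _ _ hm, Nat.div_eq_of_lt hj, Nat.zero_add]
    have h2 : (n * m + j) % m = j := by
      rw [Nat.add_comm, Nat.add_mul_mod_self_right, Nat.mod_eq_of_lt hj]
    rw [h1, h2]

/-- `i // h` for a natural `i` and positive `h` is natural division. -/
theorem pv_fd (i : Nat) (h : Int) (hp : 0 < h) :
    PySem.Int.floordiv (i : Int) h = ((i / h.toNat : Nat) : Int) := by
  obtain ⟨m, rfl⟩ := Int.eq_ofNat_of_zero_le hp.le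
  simp [PySem.Int.floordiv_natCast]

/-- `i % h` for a natural `i` and positive `h` is natural remainder. -/
theorem pv_md (i : Nat) (h : Int) (hp : 0 < h) :
    PySem.Int.mod (i : Int) h = ((i % h.toNat : Nat) : Int) := by
  obtain ⟨m, rfl⟩ := Int.eq_ofNat_of_zero_le hp.le
  simp [PySem.Int.mod_natCast]

/-- Core: the nested Int double loop equals B's flat decoded loop. -/
theorem pv_key (bx by_ w h : Int) :
    (PySem.List.pyRange bx (bx + w) 1).flatMap (fun x =>
      (PySem.List.pyRange by_ (by_ + h) 1).map (fun y => (x, y))) =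
    (PySem.List.pyRange 0 (if 0 < w ∧ 0 < h then w * h else 0) 1).map
      (fun i => (bx + PySem.Int.floordiv i h, by_ + PySem.Int.mod i h)) := by
  by_cases hw : w ≤ 0
  · rw [if_neg (by omega), PySem.List.pyRange_zero]
    simp [PySem.List.pyRange_one_eq_nil (by omega : bx + w ≤ bx)]
  · by_cases hh : h ≤ 0
    · rw [if_neg (by omega), PySem.List.pyRange_zero]
      have h2 : PySem.List.pyRange by_ (by_ + h) 1 = [] :=
        PySem.List.pyRange_one_eq_nil (by omega)
      simp [h2]
    · -- w > 0, h > 0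
      rw [if_pos (by omega : 0 < w ∧ 0 < h)]
      have hwh : (w * h).toNat = w.toNat * h.toNat := by
        obtain ⟨n, rfl⟩ := Int.eq_ofNat_of_zero_le (by omega : (0:Int) ≤ w)
        obtain ⟨m, rfl⟩ := Int.eq_ofNat_of_zero_le (by omega : (0:Int) ≤ h)
        rw [← Int.natCast_mul, Int.toNat_natCast, Int.toNat_natCast, Int.toNat_natCast]
      rw [PySem.List.pyRange_one bx (bx + w), PySem.List.pyRange_one by_ (by_ + h),
          PySem.List.pyRange_one 0 (w * h)]
      simp only [add_sub_cancel_left, Int.sub_zero, hwh, List.flatMap_map, List.map_map,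
        Function.comp_def, zero_add]
      rw [pv_flatdecode (fun k j => ((bx + (k : Int), by_ + (j : Int)) : Int × Int))]
      apply List.map_congr_left
      intro i hi
      rw [pv_fd i h (by omega), pv_md i h (by omega)]

-- ===== VERDICT (by name: the statement is the Claim_ definition above) =====
theorem range2d_spec : Claim_equal_range2d := by
  intro a b _
  unfold Spec_range2d range2d range2d_alt
  match b with
  | some bb =>
    have := pv_key a.1 a.2 (bb.1 - a.1) (bb.2 - a.2)
    simpa using this
  | none =>
    have := pv_key 0 0 a.1 a.2
    simpa using this
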